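-- pv_equiv track=rewrite | github.com/Feng-Wang-Research-Group/The-hierarchical-behavioral-analysis-framework | Figure2_skeleton_kinematics(related to sFigure2F)/Figure2B_gaits_analysis.py | judge_ascending
-- ===== SOURCE A (Python) =====
-- def judge_ascending(alist,blist):
--     new_list1 = []
--     new_list2 = []
--     peak_true = []                #peak_index
--     valley_true = []              #value_index
--     for i in range(1,len(alist)):
--         v1 = alist[i-1]
--         v2 = alist[i]
--         v3 = blist[i-1]
--         v4 = blist[i]
--         if v1 < v2:
--             new_list1.append(v1)
--             if v3 > 0:
--                 peak_true.append(v1)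
--                 new_list2.append(v3)
--             else:
--                 valley_true.append(v1)
--                 new_list2.append(-v3)
--         else:
--             break
--     return(peak_true,valley_true,new_list1,new_list2)
-- ===== SOURCE B (Python) =====
-- def judge_ascending(alist, blist):
--     # cut = length of the strictly-ascending run of consecutive pairs at the front
--     cut = 0
--     for x, y in zip(alist, alist[1:]):
--         if x < y:
--             cut += 1
--         else:
--             break
--     bs = blist[:cut]
--     peak_true = [a for a, b in zip(alist, bs) if b > 0]
--     valley_true = [a for a, b in zip(alist, bs) if b <= 0]
--     new_list1 = alist[:cut]
--     new_list2 = [b if b > 0 else -b for b in bs]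
--     return (peak_true, valley_true, new_list1, new_list2)
-- ===== Notes on version B (the rewrite author's own statement) =====
-- stated objective: simpler
-- what changed: A's single index loop that interleaves the break test with four conditional appends is replaced by a consecutive-pair zip scan that first finds the ascending-prefix length, after which all four outputs are built independently by slicing and zip comprehensions.
import Mathlib
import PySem

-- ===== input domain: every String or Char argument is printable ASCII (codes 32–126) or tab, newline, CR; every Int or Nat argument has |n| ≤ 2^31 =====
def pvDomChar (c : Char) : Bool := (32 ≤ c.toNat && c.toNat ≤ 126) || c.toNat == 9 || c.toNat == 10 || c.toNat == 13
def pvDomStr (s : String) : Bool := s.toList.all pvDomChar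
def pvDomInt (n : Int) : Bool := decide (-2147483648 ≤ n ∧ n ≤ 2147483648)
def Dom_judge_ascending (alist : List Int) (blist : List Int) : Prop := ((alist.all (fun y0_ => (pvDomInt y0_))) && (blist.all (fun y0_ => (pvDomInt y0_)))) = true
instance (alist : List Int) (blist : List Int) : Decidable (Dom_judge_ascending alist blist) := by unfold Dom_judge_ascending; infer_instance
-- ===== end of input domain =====

-- B replaces A's index loop (with its break) by a consecutive-pair scan that finds the ascending-prefix
-- length, then builds all four outputs by slicing/zipping; objective: simpler, same O(n) cost.

-- ===== PORT A =====
-- A's loop over i in range(1, len(alist)): reads alist[i-1], alist[i], blist[i-1], blist[i],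
-- appends while ascending, breaks otherwise.  State = (peak_true, valley_true, new_list1, new_list2).
-- An out-of-range read is Python's IndexError; the port stops there (such inputs are outside Pre_).
def aGo (alist blist : List Int) : List Nat → (List Int × List Int × List Int × List Int) → (List Int × List Int × List Int × List Int)
  | [], st => st
  | i :: rest, (pk, vl, l1, l2) =>
    match PySem.List.pyGet? alist ((i : Int) - 1), PySem.List.pyGet? alist (i : Int),
          PySem.List.pyGet? blist ((i : Int) - 1), PySem.List.pyGet? blist (i : Int) with
    | some v1, some v2, some v3, some _ =>
      if v1 < v2 then
        if v3 > 0 then aGo alist blist rest (pk ++ [v1], vl, l1 ++ [v1], l2 ++ [v3])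
        else aGo alist blist rest (pk, vl ++ [v1], l1 ++ [v1], l2 ++ [-v3])
      else (pk, vl, l1, l2)
    | _, _, _, _ => (pk, vl, l1, l2)

def judge_ascending (alist : List Int) (blist : List Int) : List Int × List Int × List Int × List Int :=
  aGo alist blist (List.range' 1 (alist.length - 1)) ([], [], [], [])

-- ===== PORT B =====
-- length of the strictly-ascending run of consecutive pairs at the front (B's zip loop)
def bCut : List Int → Nat
  | x :: y :: rest => if x < y then 1 + bCut (y :: rest) else 0
  | _ => 0

def judge_ascending_alt (alist : List Int) (blist : List Int) : List Int × List Int × List Int × List Int :=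
  let cut := bCut alist
  let bs := blist.take cut
  (((alist.zip bs).filter (fun p => p.2 > 0)).map Prod.fst,
   ((alist.zip bs).filter (fun p => p.2 ≤ 0)).map Prod.fst,
   alist.take cut,
   bs.map (fun b => if b > 0 then b else -b))

-- ===== PRECONDITION & SPEC =====
-- Pre_ excludes exactly the inputs where A raises IndexError: whenever the loop reaches index i
-- (every earlier consecutive pair strictly ascends), blist must have an element at i.
def Pre_judge_ascending (alist : List Int) (blist : List Int) : Prop :=
  ∀ i : Nat, i < alist.length → 0 < i →
    (∀ j : Nat, j < i → 0 < j → alist.getD (j - 1) 0 < alist.getD j 0) →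
    i < blist.length
instance (alist : List Int) (blist : List Int) : Decidable (Pre_judge_ascending alist blist) := by
  unfold Pre_judge_ascending; infer_instance

def pvWitness_judge_ascending : List Int × List Int := ([1, 2, 2, 5], [3, -1, 0, 4])

def Spec_judge_ascending (alist : List Int) (blist : List Int) (out : List Int × List Int × List Int × List Int) : Prop := out = judge_ascending_alt alist blist
instance (alist : List Int) (blist : List Int) (out : List Int × List Int × List Int × List Int) : Decidable (Spec_judge_ascending alist blist out) := by unfold Spec_judge_ascending; infer_instance

-- ===== CLAIM (what is proved, stated in full; the proofs are below) =====
def Claim_equal_judge_ascending : Prop := ∀ (alist : List Int) (blist : List Int), Dom_judge_ascending alist blist → Pre_judge_ascending alist blist → Spec_judge_ascending alist blist (judge_ascending alist blist)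

-- ===== LEMMAS AND PROOFS =====

-- shifting the index window: running A's loop on the tails with indices one lower
lemma aGo_shift (x w : Int) (xs ws : List Int) :
    ∀ (n s : Nat) (st : List Int × List Int × List Int × List Int), 1 ≤ s →
      aGo (x :: xs) (w :: ws) (List.range' (s + 1) n) st = aGo xs ws (List.range' s n) st := by
  intro n
  induction n with
  | zero => intro s st _; rfl
  | succ m ih =>
    intro s st hs
    rw [List.range'_succ, List.range'_succ]
    obtain ⟨pk, vl, l1, l2⟩ := st
    have h1 : ((s + 1 : Nat) : Int) - 1 = ((s : Nat) : Int) := by push_cast; ring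
    have h2 : PySem.List.pyGet? (x :: xs) ((s : Nat) : Int) = PySem.List.pyGet? xs ((s : Int) - 1) := by
      have e : ((s : Nat) : Int) = ((s - 1 : Nat) : Int) + 1 := by omega
      rw [e, PySem.List.pyGet?_cons_succ]
      congr 1
      omega
    have h3 : PySem.List.pyGet? (w :: ws) ((s : Nat) : Int) = PySem.List.pyGet? ws ((s : Int) - 1) := by
      have e : ((s : Nat) : Int) = ((s - 1 : Nat) : Int) + 1 := by omega
      rw [e, PySem.List.pyGet?_cons_succ]
      congr 1
      omega
    have h4 : PySem.List.pyGet? (x :: xs) (((s + 1 : Nat) : Int)) = PySem.List.pyGet? xs (s : Int) := by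
      have e : (((s + 1 : Nat)) : Int) = ((s : Nat) : Int) + 1 := by push_cast; ring
      rw [e, PySem.List.pyGet?_cons_succ]
    have h5 : PySem.List.pyGet? (w :: ws) (((s + 1 : Nat) : Int)) = PySem.List.pyGet? ws (s : Int) := by
      have e : (((s + 1 : Nat)) : Int) = ((s : Nat) : Int) + 1 := by push_cast; ring
      rw [e, PySem.List.pyGet?_cons_succ]
    simp only [aGo, h1, h2, h3, h4, h5]
    have step : List.range' (s + 1 + 1) m = List.range' ((s + 1) + 1) m := rfl
    cases PySem.List.pyGet? xs ((s : Int) - 1) with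
    | none => rfl
    | some v1 =>
      cases PySem.List.pyGet? xs (s : Int) with
      | none => cases PySem.List.pyGet? ws ((s : Int) - 1) <;> rfl
      | some v2 =>
        cases PySem.List.pyGet? ws ((s : Int) - 1) with
        | none => rfl
        | some v3 =>
          cases PySem.List.pyGet? ws (s : Int) with
          | none => rfl
          | some v4 =>
            by_cases hv : v1 < v2
            · simp only [if_pos hv]
              by_cases hp : v3 > 0
              · simp only [if_pos hp]; rw [step]; exact ih (s + 1) _ (by omega)
              · simp only [if_neg hp]; rw [step]; exact ih (s + 1) _ (by omega)
            · simp only [if_neg hv]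

-- the tails of a Pre_-admissible ascending pair are Pre_-admissible
lemma pre_tail (x y w u : Int) (rest ws : List Int)
    (hxy : x < y)
    (h : Pre_judge_ascending (x :: y :: rest) (w :: u :: ws)) :
    Pre_judge_ascending (y :: rest) (u :: ws) := by
  intro i hi hpos hasc
  have hasc' : ∀ j : Nat, j < i + 1 → 0 < j →
      (x :: y :: rest).getD (j - 1) 0 < (x :: y :: rest).getD j 0 := by
    intro j hj hjpos
    match j, hjpos with
    | 1, _ => simpa using hxy
    | (k + 2), _ =>
      have := hasc (k + 1) (by omega) (by omega)
      simpa using this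
  have h2 := h (i + 1) (by simp at hi ⊢ <;> omega) (by omega) hasc'
  simp at h2 ⊢
  omega

-- main invariant: A's loop from any accumulator state appends exactly B's four outputs
lemma main_lemma :
    ∀ (a b pk vl l1 l2 : List Int),
      Pre_judge_ascending a b →
      aGo a b (List.range' 1 (a.length - 1)) (pk, vl, l1, l2) =
        (pk ++ (judge_ascending_alt a b).1,
         vl ++ (judge_ascending_alt a b).2.1,
         l1 ++ (judge_ascending_alt a b).2.2.1,
         l2 ++ (judge_ascending_alt a b).2.2.2) := by
  intro a
  induction a with
  | nil => intro b pk vl l1 l2 _; simp [aGo, judge_ascending_alt, bCut]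
  | cons x xs ih =>
    intro b pk vl l1 l2 hpre
    match xs with
    | [] => simp [aGo, judge_ascending_alt, bCut]
    | y :: rest =>
      -- the loop does run its first iteration, so blist has ≥ 2 elements
      have hb : 1 < b.length := hpre 1 (by simp) (by omega) (by intro j hj hjpos; omega)
      match b with
      | [] => simp at hb
      | [w] => simp at hb
      | w :: u :: ws =>
        have hlen : (x :: y :: rest).length - 1 = rest.length + 1 := by simp
        rw [hlen, List.range'_succ]
        simp only [aGo]
        have e1 : ((1 : Nat) : Int) - 1 = (0 : Int) := by norm_num
        rw [e1]
        simp only [PySem.List.pyGet?_zero_cons]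
        have e2 : PySem.List.pyGet? (x :: y :: rest) ((1 : Nat) : Int) = some y := by simp
        have e3 : PySem.List.pyGet? (w :: u :: ws) ((1 : Nat) : Int) = some u := by simp
        rw [e2, e3]
        by_cases hxy : x < y
        · simp only [if_pos hxy]
          have hshift : ∀ st, aGo (x :: y :: rest) (w :: u :: ws) (List.range' 2 rest.length) st
              = aGo (y :: rest) (u :: ws) (List.range' 1 rest.length) st := by
            intro st
            exact aGo_shift x w (y :: rest) (u :: ws) rest.length 1 st (by omega)
          have htail := pre_tail x y w u rest ws hxy hpre
          have hlen2 : (y :: rest).length - 1 = rest.length := by simp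
          by_cases hw : w > 0
          · simp only [if_pos hw]
            rw [hshift]
            have := ih (u :: ws) (pk ++ [x]) vl (l1 ++ [x]) (l2 ++ [w]) htail
            rw [hlen2] at this
            rw [this]
            simp only [judge_ascending_alt, bCut, if_pos hxy]
            simp [List.filter_cons, hw, show ¬ (w ≤ 0) by omega, Nat.add_comm 1 (bCut (y :: rest)), List.take_succ_cons]
          · simp only [if_neg hw]
            rw [hshift]
            have := ih (u :: ws) pk (vl ++ [x]) (l1 ++ [x]) (l2 ++ [-w]) htail
            rw [hlen2] at this
            rw [this]
            simp only [judge_ascending_alt, bCut, if_pos hxy]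
            simp [List.filter_cons, show (w ≤ 0) by omega, show ¬ (0 < w) by omega,
                  Nat.add_comm 1 (bCut (y :: rest)), List.take_succ_cons]
        · simp only [if_neg hxy]
          simp [judge_ascending_alt, bCut, if_neg hxy]

-- ===== VERDICT (by name: the statement is the Claim_ definition above) =====
theorem judge_ascending_spec : Claim_equal_judge_ascending := by
  intro alist blist _ hpre
  unfold Spec_judge_ascending judge_ascending
  rw [main_lemma alist blist [] [] [] [] hpre]
  rfl
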